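-- pv_equiv track=rewrite | github.com/bgabrovsek/Latex2Moodle | latex.py | clean_and_insert
-- ===== SOURCE A (Python) =====
-- def clean_and_insert(expression, parameters = None, values = None):
--     """ evaluate string expression with parameters having values """
--     s = expression
--
--     # clean up
--     s = s.replace("^","**")
--     while s.find(' ') > -1:
--         s = s.replace(' ','')
--     i = 0
--     while i < len(s)-1:
--         if (s[i].isalpha() or  s[i].isnumeric()) and s[i+1].isalpha():
--             s = s[:i+1] + "*" + s[i+1:]
--             i += 1
--         i += 1
--
--     # insert parameter values
--     if parameters is not None and values is not None:
--         for par, val in zip(parameters, values):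
--             s = s.replace(par, "(" + str(val) + ")")
--
--     #parse_expr(new_expression, evaluate=True)
--
--     return s
-- ===== SOURCE B (Python) =====
-- def clean_and_insert(expression, parameters=None, values=None):
--     """ evaluate string expression with parameters having values """
--     s = expression.replace("^", "**").replace(" ", "")
--     # one pass over adjacent pairs instead of index-based re-slicing
--     s = "".join(a + "*" if (a.isalpha() or a.isnumeric()) and b.isalpha() else a
--                 for a, b in zip(s, s[1:])) + s[-1:]
--     if parameters is not None and values is not None:
--         for par, val in zip(parameters, values):
--             s = s.replace(par, "(" + str(val) + ")")
--     return s
-- ===== Notes on version B (the rewrite author's own statement) =====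
-- stated objective: simpler
-- what changed: A's index-mutating while loop that re-slices the string at every insertion is replaced by a single pairwise pass over zip(s, s[1:]) that emits each character plus an inserted asterisk where needed; the space removal becomes one replace call and the parameter-substitution loop is kept verbatim.
import Mathlib
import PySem

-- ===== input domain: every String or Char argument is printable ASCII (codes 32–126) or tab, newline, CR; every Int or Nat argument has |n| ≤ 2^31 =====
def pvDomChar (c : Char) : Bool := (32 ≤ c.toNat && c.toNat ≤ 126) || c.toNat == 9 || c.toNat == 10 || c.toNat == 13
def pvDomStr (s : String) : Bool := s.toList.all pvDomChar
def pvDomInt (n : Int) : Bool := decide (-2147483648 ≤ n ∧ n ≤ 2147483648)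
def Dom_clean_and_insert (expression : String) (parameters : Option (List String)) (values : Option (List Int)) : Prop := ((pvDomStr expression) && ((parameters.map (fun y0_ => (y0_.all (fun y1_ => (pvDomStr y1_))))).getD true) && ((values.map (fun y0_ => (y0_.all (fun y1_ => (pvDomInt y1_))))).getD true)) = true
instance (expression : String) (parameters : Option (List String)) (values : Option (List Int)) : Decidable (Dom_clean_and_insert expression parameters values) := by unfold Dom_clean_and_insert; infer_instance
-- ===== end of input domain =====

-- B replaces A's index-based insert-and-reslice loop by a single pairwise pass (simpler, one pass, no quadratic re-slicing); the parameter-substitution loop is kept verbatim.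

-- ===== PORT A =====

-- termination fact for A's `while s.find(' ') > -1` loop: replacing ' ' by '' removes all spaces
theorem pvReplaceSpace_eq_filter (s : List Char) :
    PySem.Chars.replace s [' '] [] = s.filter (fun c => c != ' ') := by
  have go : ∀ (fuel : Nat) (l acc : List Char), l.length ≤ fuel →
      PySem.Chars.replace.go [' '] [] fuel l acc = acc.reverse ++ l.filter (fun c => c != ' ') := by
    intro fuel
    induction fuel with
    | zero => intro l acc h; cases l with
      | nil => simp [PySem.Chars.replace.go]
      | cons c t => simp at h
    | succ n ih =>
      intro l acc h
      cases l with
      | nil => simp [PySem.Chars.replace.go]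
      | cons c t =>
        simp only [PySem.Chars.replace.go]
        by_cases hc : c = ' '
        · subst hc
          rw [if_pos (by simp [List.isPrefixOf])]
          have hd : List.drop [' '].length (' ' :: t) = t := rfl
          rw [hd, ih t ([].reverse ++ acc) (by simpa using h)]
          simp
        · rw [if_neg (by simp [List.isPrefixOf]; intro hh; exact hc hh.symm)]
          rw [ih t (c :: acc) (by simpa using h)]
          simp [hc]
  simp only [PySem.Chars.replace]
  rw [if_neg (by simp)]
  rw [go s.length s [] le_rfl]
  simp

theorem pvFilterSpace_count_zero (s : List Char) :
    (s.filter (fun c => c != ' ')).count ' ' = 0 := by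
  simp [List.count_eq_zero, List.mem_filter]

-- `while s.find(' ') > -1: s = s.replace(' ','')`  (port of A's space-removal loop)
def pvSpaceLoopA (s : List Char) : List Char :=
  if PySem.Chars.find s [' '] > -1 then
    pvSpaceLoopA (PySem.Chars.replace s [' '] [])
  else s
termination_by s.count ' '
decreasing_by
  rename_i h
  rw [pvReplaceSpace_eq_filter, pvFilterSpace_count_zero]
  have : [' '] <:+: s := by
    by_contra hn
    rw [← PySem.Chars.find_eq_neg_one_iff] at hn
    omega
  have : ' ' ∈ s := by
    rcases this with ⟨l, r, hr⟩
    exact hr ▸ (by simp)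
  exact List.count_pos_iff.mpr this

-- `while i < len(s)-1: if (s[i].isalpha() or s[i].isnumeric()) and s[i+1].isalpha(): s = s[:i+1]+"*"+s[i+1:]; i += 1; i += 1`
-- (Python isnumeric = isdigit on the ASCII domain; s[:i+1]/s[i+1:] with 0 ≤ i+1 ≤ len are take/drop)
def pvInsLoopA (s : List Char) (i : Nat) : List Char :=
  if h : i + 1 < s.length then
    if (PySem.Chars.isalpha s[i] || PySem.Chars.isdigit s[i]) && PySem.Chars.isalpha s[i+1] then
      pvInsLoopA (s.take (i+1) ++ '*' :: s.drop (i+1)) (i+2)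
    else
      pvInsLoopA s (i+1)
  else s
termination_by s.length - i
decreasing_by
  · simp only [List.length_append, List.length_take, List.length_cons, List.length_drop]
    omega
  · omega

-- `for par, val in zip(parameters, values): s = s.replace(par, "(" + str(val) + ")")`
def pvSubstA (s : List Char) (ps : List String) (vs : List Int) : List Char :=
  (ps.zip vs).foldl
    (fun s pv => PySem.Chars.replace s pv.1.toList ('(' :: (PySem.Int.toChars pv.2 ++ [')']))) s

def clean_and_insert (expression : String) (parameters : Option (List String)) (values : Option (List Int)) : String :=
  let s := (PySem.Str.replace expression "^" "**").toList
  let s := pvSpaceLoopA s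
  let s := pvInsLoopA s 0
  let s := match parameters, values with
    | some ps, some vs => pvSubstA s ps vs
    | _, _ => s
  String.ofList s

-- ===== PORT B =====

-- `"".join(a + "*" if (a.isalpha() or a.isnumeric()) and b.isalpha() else a for a, b in zip(s, s[1:])) + s[-1:]`
def pvInsB : List Char → List Char
  | [] => []
  | [c] => [c]
  | a :: b :: t =>
    a :: ((if (PySem.Chars.isalpha a || PySem.Chars.isdigit a) && PySem.Chars.isalpha b then ['*'] else []) ++ pvInsB (b :: t))

-- parameter-substitution loop, kept verbatim from A's source in Source B
def pvSubstB (s : List Char) (ps : List String) (vs : List Int) : List Char :=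
  (ps.zip vs).foldl
    (fun s pv => PySem.Chars.replace s pv.1.toList ('(' :: (PySem.Int.toChars pv.2 ++ [')']))) s

def clean_and_insert_alt (expression : String) (parameters : Option (List String)) (values : Option (List Int)) : String :=
  let s := (PySem.Str.replace expression "^" "**").toList
  let s := PySem.Chars.replace s [' '] []
  let s := pvInsB s
  let s := match parameters with
    | some ps =>
      match values with
      | some vs => pvSubstB s ps vs
      | none => s
    | none => s
  String.ofList s

-- ===== PRECONDITION & SPEC =====
def Spec_clean_and_insert (expression : String) (parameters : Option (List String)) (values : Option (List Int)) (out : String) : Prop := out = clean_and_insert_alt expression parameters values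
instance (expression : String) (parameters : Option (List String)) (values : Option (List Int)) (out : String) : Decidable (Spec_clean_and_insert expression parameters values out) := by unfold Spec_clean_and_insert; infer_instance

-- ===== CLAIM (what is proved, stated in full; the proofs are below) =====
def Claim_equal_clean_and_insert : Prop := ∀ (expression : String) (parameters : Option (List String)) (values : Option (List Int)), Dom_clean_and_insert expression parameters values → Spec_clean_and_insert expression parameters values (clean_and_insert expression parameters values)

-- ===== LEMMAS AND PROOFS =====

theorem pvFind_go_nonneg_or (sub l : List Char) (k : Nat) :
    PySem.Chars.find.go sub l k = -1 ∨ 0 ≤ PySem.Chars.find.go sub l k := by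
  induction l generalizing k with
  | nil =>
    simp only [PySem.Chars.find.go]
    split_ifs
    · right; positivity
    · left; rfl
  | cons c t ih =>
    simp only [PySem.Chars.find.go]
    split_ifs
    · right; positivity
    · exact ih (k + 1)

theorem pvSpaceLoopA_eq (s : List Char) :
    pvSpaceLoopA s = PySem.Chars.replace s [' '] [] := by
  rw [pvSpaceLoopA]
  by_cases h : PySem.Chars.find s [' '] > -1
  · rw [if_pos h, pvSpaceLoopA, if_neg ?_]
    rw [pvReplaceSpace_eq_filter]
    have hf : PySem.Chars.find (s.filter (fun c => c != ' ')) [' '] = -1 := by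
      rw [PySem.Chars.find_eq_neg_one_iff]
      intro hin
      rcases hin with ⟨l, r, hr⟩
      have : ' ' ∈ s.filter (fun c => c != ' ') := hr ▸ (by simp)
      simp [List.mem_filter] at this
    omega
  · rw [if_neg h]
    have hf : PySem.Chars.find s [' '] = -1 := by
      rcases pvFind_go_nonneg_or [' '] s 0 with h1 | h1
      · simpa [PySem.Chars.find] using h1
      · exfalso
        have h2 : 0 ≤ PySem.Chars.find s [' '] := by simpa [PySem.Chars.find] using h1
        omega
    rw [PySem.Chars.find_eq_neg_one_iff] at hf
    rw [pvReplaceSpace_eq_filter]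
    symm
    apply List.filter_eq_self.mpr
    intro a ha
    simp only [bne_iff_ne, ne_eq]
    intro hsp
    subst hsp
    rcases List.append_of_mem ha with ⟨l, r, hr⟩
    exact hf ⟨l, r, by simpa using hr.symm⟩

theorem pvInsLoopA_eq (rest p : List Char) :
    pvInsLoopA (p ++ rest) p.length = p ++ pvInsB rest := by
  induction rest using pvInsB.induct generalizing p with
  | case1 => rw [pvInsLoopA, dif_neg (by simp)]; simp [pvInsB]
  | case2 c => rw [pvInsLoopA, dif_neg (by simp)]; simp [pvInsB]
  | case3 a b t ih =>
    rw [pvInsLoopA, dif_pos (by simp)]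
    have ha : ∀ (h : p.length < (p ++ a :: b :: t).length),
        (p ++ a :: b :: t)[p.length]'h = a := by
      intro h; rw [List.getElem_append_right (le_refl _)]; simp
    have hb : ∀ (h : p.length + 1 < (p ++ a :: b :: t).length),
        (p ++ a :: b :: t)[p.length + 1]'h = b := by
      intro h; rw [List.getElem_append_right (by omega)]; simp
    simp only [ha, hb]
    by_cases hc : (PySem.Chars.isalpha a || PySem.Chars.isdigit a) && PySem.Chars.isalpha b
    · rw [if_pos hc]
      rw [show p ++ a :: b :: t = (p ++ [a]) ++ (b :: t) by simp]
      rw [show p.length + 1 = (p ++ [a]).length by simp]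
      rw [List.take_left, List.drop_left]
      rw [show (p ++ [a]) ++ '*' :: b :: t = (p ++ [a, '*']) ++ (b :: t) by simp]
      rw [show p.length + 2 = (p ++ [a, '*']).length by simp]
      rw [ih]
      simp [pvInsB, hc]
    · rw [if_neg hc]
      rw [show p ++ a :: b :: t = (p ++ [a]) ++ (b :: t) by simp]
      rw [show p.length + 1 = (p ++ [a]).length by simp]
      rw [ih]
      simp [pvInsB, hc]

theorem pvIns_eq (s : List Char) : pvInsLoopA s 0 = pvInsB s := by
  simpa using pvInsLoopA_eq s []

-- ===== VERDICT (by name: the statement is the Claim_ definition above) =====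
theorem clean_and_insert_spec : Claim_equal_clean_and_insert := by
  intro e ps vs _
  simp only [Spec_clean_and_insert, clean_and_insert, clean_and_insert_alt,
    pvSpaceLoopA_eq, pvIns_eq]
  cases ps <;> cases vs <;> rfl
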